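-- pv_equiv track=rewrite | github.com/anaqvi02/Knucklebones-AI | game.py | _calculate_column_score
-- ===== SOURCE A (Python) =====
-- def _calculate_column_score(column):
--     score = 0
--     counts = {}
--     for die in column:
--         counts[die] = counts.get(die, 0) + 1
--
--     for die, count in counts.items():
--         score += die * count * count
--     return score
-- ===== SOURCE B (Python) =====
-- def _calculate_column_score(column):
--     score = 0
--     cur = None
--     run = 0
--     for die in sorted(column):
--         if die == cur:
--             run += 1
--         else:
--             if run:
--                 score += cur * run * run
--             cur = die
--             run = 1
--     if run:
--         score += cur * run * run
--     return score
-- ===== Notes on version B (the rewrite author's own statement) =====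
-- stated objective: alternative
-- what changed: Replaces the frequency dict plus second pass over dict items by a single scan over sorted(column) that tracks only the current run's value and length, closing each run as value*runlen**2.
import Mathlib
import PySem

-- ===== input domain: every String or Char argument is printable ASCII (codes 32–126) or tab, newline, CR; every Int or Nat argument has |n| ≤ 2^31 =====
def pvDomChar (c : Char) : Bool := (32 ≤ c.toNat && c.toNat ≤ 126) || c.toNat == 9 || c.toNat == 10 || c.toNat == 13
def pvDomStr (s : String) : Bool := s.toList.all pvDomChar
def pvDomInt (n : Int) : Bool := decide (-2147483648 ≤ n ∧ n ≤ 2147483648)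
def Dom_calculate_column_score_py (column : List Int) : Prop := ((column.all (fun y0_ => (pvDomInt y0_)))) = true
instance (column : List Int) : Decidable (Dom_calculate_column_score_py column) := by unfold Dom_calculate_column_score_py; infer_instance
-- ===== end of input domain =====

-- B replaces A's frequency dict plus second pass over dict items by a single scan over
-- sorted(column) tracking only the current run (alternative decomposition, not claimed faster).

-- ===== PORT A =====
def calculate_column_score_py (column : List Int) : Int :=
  let counts : PySem.Dict Int Int :=
    column.foldl (fun d die => d.insert die (d.getD die 0 + 1)) PySem.Dict.empty
  counts.items.foldl (fun score p => score + p.1 * p.2 * p.2) 0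

-- ===== PORT B =====
-- In the Python, `cur * run * run` is only evaluated when run ≠ 0, where cur holds an int;
-- `cur.getD 0` renders that access (the default 0 is never used, since run ≠ 0 → cur ≠ none).
def pvAltLoop : List Int → Option Int → Int → Int → Int
  | [], cur, run, score => if run ≠ 0 then score + cur.getD 0 * run * run else score
  | die :: rest, cur, run, score =>
      if some die = cur then pvAltLoop rest cur (run + 1) score
      else pvAltLoop rest (some die) 1 (if run ≠ 0 then score + cur.getD 0 * run * run else score)

def calculate_column_score_py_alt (column : List Int) : Int :=
  pvAltLoop (PySem.List.sorted column (fun x => x) false) none 0 0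

-- ===== PRECONDITION & SPEC =====
def Spec_calculate_column_score_py (column : List Int) (out : Int) : Prop := out = calculate_column_score_py_alt column
instance (column : List Int) (out : Int) : Decidable (Spec_calculate_column_score_py column out) := by unfold Spec_calculate_column_score_py; infer_instance

-- ===== CLAIM (what is proved, stated in full; the proofs are below) =====
def Claim_equal_calculate_column_score_py : Prop := ∀ (column : List Int), Dom_calculate_column_score_py column → Spec_calculate_column_score_py column (calculate_column_score_py column)

-- ===== LEMMAS AND PROOFS =====

/-- `sumf m` = Σ over the distinct values `k` of `m` (first-occurrence order) of `k·count(k)²`: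
the common value both programs compute. -/
def sumf (m : List Int) : Int :=
  ((PySem.List.dedup m).map (fun k => k * (m.count k : Int) * (m.count k : Int))).sum

lemma A_eq_sumf (column : List Int) : calculate_column_score_py column = sumf column := by
  show (PySem.Dict.items (column.foldl (fun d die => d.insert die (d.getD die 0 + 1)) PySem.Dict.empty)).foldl
      (fun score p => score + p.1 * p.2 * p.2) 0 = sumf column
  rw [PySem.Dict.foldl_insert_getD_add_one_eq_counter, PySem.Dict.items_counter,
      PySem.List.foldl_add (g := fun p : Int × Int => p.1 * p.2 * p.2)]
  simp [sumf, List.map_map, Function.comp_def, PySem.List.dedup_eq_ofList]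

/-- Peeling the first value off `sumf`: the head's contribution plus `sumf` of the rest
with all copies of the head removed. Holds for any list. -/
lemma sumf_cons (d : Int) (rest : List Int) :
    sumf (d :: rest)
      = d * (1 + (rest.count d : Int)) * (1 + (rest.count d : Int))
        + sumf (rest.filter (fun x => x ≠ d)) := by
  have hnd : d ∉ PySem.List.dedup (rest.filter (fun x => x ≠ d)) := by
    simp
  have hperm : (PySem.List.dedup (d :: rest)).Perm
      (d :: PySem.List.dedup (rest.filter (fun x => x ≠ d))) := by
    rw [List.perm_ext_iff_of_nodup (PySem.List.nodup_dedup _)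
        (List.nodup_cons.mpr ⟨hnd, PySem.List.nodup_dedup _⟩)]
    intro a
    by_cases h : a = d <;> simp [h]
  have hmc : List.map (fun k => k * ((d :: rest).count k : Int) * ((d :: rest).count k : Int))
        (PySem.List.dedup (rest.filter (fun x => x ≠ d)))
      = List.map (fun k => k * ((rest.filter (fun x => x ≠ d)).count k : Int)
          * ((rest.filter (fun x => x ≠ d)).count k : Int))
        (PySem.List.dedup (rest.filter (fun x => x ≠ d))) := by
    apply List.map_congr_left
    intro k hk
    have hk' : k ∈ rest.filter (fun x => x ≠ d) := (PySem.List.mem_dedup _ _).mp hk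
    have hne : k ≠ d := by simpa using (List.mem_filter.mp hk').2
    simp [List.count_filter, hne, Ne.symm hne]
  have h1 : ((d :: rest).count d : Int) = 1 + (rest.count d : Int) := by
    rw [List.count_cons_self]; push_cast; ring
  unfold sumf
  rw [(hperm.map _).sum_eq]
  simp only [List.map_cons, List.sum_cons]
  rw [h1, hmc]

/-- Invariant of B's scan: with an open run `(c, run)` and a sorted remainder whose elements
all dominate `c`, the scan closes the run (absorbing any leading copies of `c`) and scores
the remaining runs. -/
lemma pvAltLoop_run (l : List Int) :
    ∀ (c run score : Int), l.Pairwise (· ≤ ·) → (∀ y ∈ l, c ≤ y) → 1 ≤ run →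
    pvAltLoop l (some c) run score
      = score + c * (run + (l.count c : Int)) * (run + (l.count c : Int))
        + sumf (l.filter (fun x => x ≠ c)) := by
  induction l with
  | nil =>
    intro c run score _ _ hrun
    simp [pvAltLoop, show run ≠ 0 by omega, sumf, PySem.List.dedup]
  | cons d rest ih =>
    intro c run score hp hc hrun
    have hprest : rest.Pairwise (· ≤ ·) := hp.of_cons
    have hd_le : ∀ y ∈ rest, d ≤ y := fun y hy => List.rel_of_pairwise_cons hp hy
    by_cases hd : d = c
    · subst hd
      rw [show pvAltLoop (d :: rest) (some d) run score = pvAltLoop rest (some d) (run + 1) score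
           by simp [pvAltLoop]]
      rw [ih d (run + 1) score hprest (fun y hy => hd_le y hy) (by omega)]
      have : ((d :: rest).count d : Int) = (rest.count d : Int) + 1 := by
        rw [List.count_cons_self]; push_cast; ring
      rw [this]
      have hf : (d :: rest).filter (fun x => x ≠ d) = rest.filter (fun x => x ≠ d) := by
        simp
      rw [hf]; ring_nf
    · have hcd : c < d := lt_of_le_of_ne (hc d (List.mem_cons_self)) (fun h => hd h.symm)
      have hcnot : c ∉ (d :: rest) := by
        intro h
        rcases List.mem_cons.mp h with h | h
        · exact hd h.symm
        · exact absurd (hd_le c h) (not_le.mpr hcd)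
      rw [show pvAltLoop (d :: rest) (some c) run score
            = pvAltLoop rest (some d) 1 (score + c * run * run) by
          simp [pvAltLoop, hd, show run ≠ 0 by omega]]
      rw [ih d 1 (score + c * run * run) hprest hd_le le_rfl]
      have hcount : ((d :: rest).count c : Int) = 0 := by
        rw [List.count_eq_zero_of_not_mem hcnot]; rfl
      have hfilter : (d :: rest).filter (fun x => x ≠ c) = d :: rest := by
        apply List.filter_eq_self.mpr
        intro a ha
        simp only [decide_eq_true_eq]
        intro h; exact hcnot (h ▸ ha)
      rw [hcount, hfilter, sumf_cons d rest]
      ring_nf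

lemma B_eq_sumf_sorted (column : List Int) :
    calculate_column_score_py_alt column = sumf (PySem.List.sorted column (fun x => x) false) := by
  unfold calculate_column_score_py_alt
  have hpw : (PySem.List.sorted column (fun x => x) false).Pairwise (· ≤ ·) := by
    simpa using PySem.List.sorted_pairwise column (fun x => x)
  cases h : PySem.List.sorted column (fun x => x) false with
  | nil => simp [pvAltLoop, sumf, PySem.List.dedup]
  | cons d rest =>
    rw [h] at hpw
    rw [show pvAltLoop (d :: rest) none 0 0 = pvAltLoop rest (some d) 1 0 by simp [pvAltLoop]]
    rw [pvAltLoop_run rest d 1 0 hpw.of_cons (fun y hy => List.rel_of_pairwise_cons hpw hy) le_rfl]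
    rw [sumf_cons d rest]
    ring_nf

lemma sumf_perm {l₁ l₂ : List Int} (h : l₁.Perm l₂) : sumf l₁ = sumf l₂ := by
  have hperm : (PySem.List.dedup l₁).Perm (PySem.List.dedup l₂) := by
    rw [List.perm_ext_iff_of_nodup (PySem.List.nodup_dedup _) (PySem.List.nodup_dedup _)]
    intro a
    simp [h.mem_iff]
  unfold sumf
  have hf : (fun k => k * (l₁.count k : Int) * (l₁.count k : Int))
      = (fun k => k * (l₂.count k : Int) * (l₂.count k : Int)) := by
    funext k; rw [h.count_eq]
  rw [hf, (hperm.map _).sum_eq]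

-- ===== VERDICT (by name: the statement is the Claim_ definition above) =====
theorem calculate_column_score_py_spec : Claim_equal_calculate_column_score_py := by
  intro column _
  unfold Spec_calculate_column_score_py
  rw [A_eq_sumf, B_eq_sumf_sorted, sumf_perm (PySem.List.sorted_perm column (fun x => x) false)]
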